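-- pv_equiv track=rewrite | github.com/Shashi1543-07/jarvis | jarvis/core/behavior_learning.py | categorize_activity
-- ===== SOURCE A (Python) =====
-- def categorize_activity(keywords):
--     """
--     Categorize the type of activity based on keywords
--     """
--     work_related = {'work', 'job', 'office', 'meeting', 'project', 'task', 'deadline', 'email', 'document'}
--     entertainment = {'movie', 'film', 'music', 'game', 'play', 'fun', 'entertainment', 'video', 'show', 'series'}
--     learning = {'study', 'learn', 'education', 'school', 'college', 'university', 'book', 'knowledge', 'skill'}
--     health = {'health', 'exercise', 'fitness', 'workout', 'diet', 'food', 'nutrition', 'sleep', 'medicine'}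
--     tech = {'computer', 'software', 'technology', 'ai', 'programming', 'code', 'app', 'device', 'internet'}
--
--     keyword_set = set([kw.lower() for kw in keywords])
--
--     if keyword_set.intersection(work_related):
--         return 'work'
--     elif keyword_set.intersection(entertainment):
--         return 'entertainment'
--     elif keyword_set.intersection(learning):
--         return 'learning'
--     elif keyword_set.intersection(health):
--         return 'health'
--     elif keyword_set.intersection(tech):
--         return 'technology'
--     else:
--         return 'general'
-- ===== SOURCE B (Python) =====
-- _LABELS = ['work', 'entertainment', 'learning', 'health', 'technology']
--
-- _KEYWORD_LISTS = [
--     ['work', 'job', 'office', 'meeting', 'project', 'task', 'deadline', 'email', 'document'],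
--     ['movie', 'film', 'music', 'game', 'play', 'fun', 'entertainment', 'video', 'show', 'series'],
--     ['study', 'learn', 'education', 'school', 'college', 'university', 'book', 'knowledge', 'skill'],
--     ['health', 'exercise', 'fitness', 'workout', 'diet', 'food', 'nutrition', 'sleep', 'medicine'],
--     ['computer', 'software', 'technology', 'ai', 'programming', 'code', 'app', 'device', 'internet'],
-- ]
--
-- # one dict: keyword -> priority index of its category (work=0 .. tech=4)
-- _PRIORITY = {kw: i for i, kws in enumerate(_KEYWORD_LISTS) for kw in kws}
--
--
-- def categorize_activity(keywords):
--     """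
--     Categorize the type of activity based on keywords
--     """
--     best = None
--     for kw in keywords:
--         p = _PRIORITY.get(kw.lower())
--         if p is not None and (best is None or p < best):
--             best = p
--     if best is None:
--         return 'general'
--     return _LABELS[best]
-- ===== Notes on version B (the rewrite author's own statement) =====
-- stated objective: alternative
-- what changed: Replaces building a lowered keyword set and intersecting it with five category sets by a single precomputed keyword-to-priority dict and one pass over the input keeping the minimum priority index.
import Mathlib
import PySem

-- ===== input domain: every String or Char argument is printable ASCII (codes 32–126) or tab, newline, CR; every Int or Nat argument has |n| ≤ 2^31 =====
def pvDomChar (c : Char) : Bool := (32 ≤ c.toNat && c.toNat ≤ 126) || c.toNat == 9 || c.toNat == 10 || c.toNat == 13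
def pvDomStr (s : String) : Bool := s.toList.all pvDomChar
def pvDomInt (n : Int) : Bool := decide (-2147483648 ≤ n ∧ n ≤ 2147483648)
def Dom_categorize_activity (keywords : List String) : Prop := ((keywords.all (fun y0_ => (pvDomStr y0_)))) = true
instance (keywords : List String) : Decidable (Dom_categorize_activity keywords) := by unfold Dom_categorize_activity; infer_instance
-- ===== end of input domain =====

-- B replaces A's five set intersections by one precomputed keyword→priority dict and a single
-- pass over the input keeping the minimum priority index (objective: alternative).


-- ===== PORT A =====
def pvWorkRelated : PySem.Set String :=
  PySem.Set.ofList ["work", "job", "office", "meeting", "project", "task", "deadline", "email", "document"]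
def pvEntertainment : PySem.Set String :=
  PySem.Set.ofList ["movie", "film", "music", "game", "play", "fun", "entertainment", "video", "show", "series"]
def pvLearning : PySem.Set String :=
  PySem.Set.ofList ["study", "learn", "education", "school", "college", "university", "book", "knowledge", "skill"]
def pvHealth : PySem.Set String :=
  PySem.Set.ofList ["health", "exercise", "fitness", "workout", "diet", "food", "nutrition", "sleep", "medicine"]
def pvTech : PySem.Set String :=
  PySem.Set.ofList ["computer", "software", "technology", "ai", "programming", "code", "app", "device", "internet"]

def categorize_activity (keywords : List String) : String :=
  let keyword_set : PySem.Set String := PySem.Set.ofList (keywords.map PySem.Str.lower)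
  if !(PySem.Set.inter keyword_set pvWorkRelated).isEmpty then "work"
  else if !(PySem.Set.inter keyword_set pvEntertainment).isEmpty then "entertainment"
  else if !(PySem.Set.inter keyword_set pvLearning).isEmpty then "learning"
  else if !(PySem.Set.inter keyword_set pvHealth).isEmpty then "health"
  else if !(PySem.Set.inter keyword_set pvTech).isEmpty then "technology"
  else "general"

-- ===== PORT B =====
def pvLabels : List String := ["work", "entertainment", "learning", "health", "technology"]

def pvKeywordLists : List (List String) :=
  [["work", "job", "office", "meeting", "project", "task", "deadline", "email", "document"],
   ["movie", "film", "music", "game", "play", "fun", "entertainment", "video", "show", "series"],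
   ["study", "learn", "education", "school", "college", "university", "book", "knowledge", "skill"],
   ["health", "exercise", "fitness", "workout", "diet", "food", "nutrition", "sleep", "medicine"],
   ["computer", "software", "technology", "ai", "programming", "code", "app", "device", "internet"]]

-- the dict comprehension {kw: i for i, kws in enumerate(_KEYWORD_LISTS) for kw in kws}
def pvPriority : PySem.Dict String Nat :=
  PySem.Dict.ofList (pvKeywordLists.zipIdx.flatMap (fun p => p.1.map (fun kw => (kw, p.2))))

-- the body of B's loop
def pvStep (best : Option Nat) (kw : String) : Option Nat :=
  match PySem.Dict.get? pvPriority (PySem.Str.lower kw) with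
  | none => best
  | some p =>
    match best with
    | none => some p
    | some b => if p < b then some p else best

def categorize_activity_alt (keywords : List String) : String :=
  match keywords.foldl pvStep none with
  | none => "general"
  | some best => pvLabels.getD best ""

-- ===== PRECONDITION & SPEC =====
def Spec_categorize_activity (keywords : List String) (out : String) : Prop := out = categorize_activity_alt keywords
instance (keywords : List String) (out : String) : Decidable (Spec_categorize_activity keywords out) := by unfold Spec_categorize_activity; infer_instance

-- ===== CLAIM (what is proved, stated in full; the proofs are below) =====
def Claim_equal_categorize_activity : Prop := ∀ (keywords : List String), Dom_categorize_activity keywords → Spec_categorize_activity keywords (categorize_activity keywords)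

-- ===== LEMMAS AND PROOFS =====

-- raw keyword lists, for stating membership facts
def pvW : List String := ["work", "job", "office", "meeting", "project", "task", "deadline", "email", "document"]
def pvE : List String := ["movie", "film", "music", "game", "play", "fun", "entertainment", "video", "show", "series"]
def pvL : List String := ["study", "learn", "education", "school", "college", "university", "book", "knowledge", "skill"]
def pvH : List String := ["health", "exercise", "fitness", "workout", "diet", "food", "nutrition", "sleep", "medicine"]
def pvT : List String := ["computer", "software", "technology", "ai", "programming", "code", "app", "device", "internet"]

-- A's truthiness test on an intersection, as an existence statement
lemma pv_inter_nonempty (xs : List String) (t : PySem.Set String) :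
    (!(PySem.Set.inter (PySem.Set.ofList xs) t).isEmpty) = true ↔ ∃ x ∈ xs, x ∈ t := by
  rw [Bool.not_eq_eq_eq_not, Bool.not_true, List.isEmpty_eq_false_iff, ne_eq, List.eq_nil_iff_forall_not_mem]
  push Not
  constructor
  · rintro ⟨y, hy⟩
    have h2 := (PySem.Set.mem_inter _ _ _).mp hy
    exact ⟨y, (PySem.Set.mem_ofList _ _).mp h2.1, h2.2⟩
  · rintro ⟨x, hx, hxt⟩
    exact ⟨x, (PySem.Set.mem_inter _ _ _).mpr ⟨(PySem.Set.mem_ofList _ _).mpr hx, hxt⟩⟩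

-- the priority dict looked up at any string is the ordered chain of membership tests
lemma pv_find_block (s : String) (l : List String) (i : Nat) (rest : List (String × Nat)) :
    ((l.map (fun k => (k, i)) ++ rest).find? (fun p => p.1 == s)).map Prod.snd
      = if s ∈ l then some i else (rest.find? (fun p => p.1 == s)).map Prod.snd := by
  induction l with
  | nil => simp
  | cons a l ih =>
    by_cases h : a = s
    · simp [h]
    · have hb : (a == s) = false := by simp [h]
      simp only [List.map_cons, List.cons_append, List.find?_cons, hb, ih, List.mem_cons]
      have : ¬ s = a := fun hsa => h hsa.symm
      simp [this]

set_option maxRecDepth 40000 in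
lemma pv_items_pvPriority :
    pvPriority.items =
      pvW.map (fun k => (k, 0)) ++ (pvE.map (fun k => (k, 1)) ++ (pvL.map (fun k => (k, 2)) ++
        (pvH.map (fun k => (k, 3)) ++ (pvT.map (fun k => (k, 4)) ++ [])))) := by
  decide

lemma pv_get?_pvPriority (s : String) :
    PySem.Dict.get? pvPriority s =
      if s ∈ pvW then some 0 else if s ∈ pvE then some 1 else if s ∈ pvL then some 2
      else if s ∈ pvH then some 3 else if s ∈ pvT then some 4 else none := by
  show (pvPriority.items.find? (fun p => p.1 == s)).map Prod.snd = _
  rw [pv_items_pvPriority, pv_find_block, pv_find_block, pv_find_block, pv_find_block,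
      pv_find_block]
  simp

-- B's fold computes the minimum of the priorities of the lowered keywords
def pvOMin (a b : Option Nat) : Option Nat :=
  match a, b with
  | none, b => b
  | some x, none => some x
  | some x, some y => some (min x y)

lemma pv_foldl_min_gen (q : String → Option Nat) (l : List String) (acc : Option Nat) :
    l.foldl (fun best kw =>
        match q kw with
        | none => best
        | some p => match best with
                    | none => some p
                    | some b => if p < b then some p else best) acc
      = pvOMin acc (l.filterMap q).min? := by
  induction l generalizing acc with
  | nil => cases acc <;> rfl
  | cons kw l ih =>
    rw [List.foldl_cons, ih]
    cases hp : q kw with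
    | none => simp [hp]
    | some p =>
      simp only [List.filterMap_cons, hp]
      have hcons : ∀ (r : List Nat),
          (p :: r).min? = some (match r.min? with | none => p | some m => min p m) := by
        intro r; cases h : r.min? <;> simp [List.min?_cons, h]
      rw [hcons]
      cases hr : (l.filterMap q).min? with
      | none =>
        cases acc with
        | none => rfl
        | some b0 => by_cases hpb : p < b0 <;> simp [pvOMin, hpb] <;> omega
      | some m =>
        cases acc with
        | none => rfl
        | some b0 => by_cases hpb : p < b0 <;> simp [pvOMin, hpb] <;> omega

set_option maxRecDepth 40000 in
lemma pv_foldl_eq_min (l : List String) (acc : Option Nat) :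
    l.foldl pvStep acc = pvOMin acc (l.filterMap (fun kw => PySem.Dict.get? pvPriority (PySem.Str.lower kw))).min? :=
  pv_foldl_min_gen (fun kw => PySem.Dict.get? pvPriority (PySem.Str.lower kw)) l acc

-- A's condition on the lowered-keyword set, as an existence statement over the input
lemma pv_condA (keywords : List String) (t : PySem.Set String) :
    (!(PySem.Set.inter (PySem.Set.ofList (keywords.map PySem.Str.lower)) t).isEmpty) = true
      ↔ ∃ kw ∈ keywords, PySem.Str.lower kw ∈ t := by
  rw [pv_inter_nonempty]
  constructor
  · rintro ⟨x, hx, hxt⟩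
    obtain ⟨kw, hkw, rfl⟩ := List.mem_map.mp hx
    exact ⟨kw, hkw, hxt⟩
  · rintro ⟨kw, hkw, h⟩
    exact ⟨PySem.Str.lower kw, List.mem_map.mpr ⟨kw, hkw, rfl⟩, h⟩

lemma pv_setW : pvWorkRelated = pvW := by decide
lemma pv_setE : pvEntertainment = pvE := by decide
lemma pv_setL : pvLearning = pvL := by decide
lemma pv_setH : pvHealth = pvH := by decide
lemma pv_setT : pvTech = pvT := by decide

theorem pv_spec (keywords : List String) :
    categorize_activity keywords = categorize_activity_alt keywords := by
  set fm := keywords.filterMap (fun kw => PySem.Dict.get? pvPriority (PySem.Str.lower kw)) with hfm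
  have hB : categorize_activity_alt keywords =
      (match fm.min? with
       | none => "general"
       | some best => pvLabels.getD best "") := by
    unfold categorize_activity_alt
    rw [pv_foldl_eq_min, ← hfm]
    cases fm.min? <;> rfl
  have hmem : ∀ b, b ∈ fm ↔ ∃ kw ∈ keywords, PySem.Dict.get? pvPriority (PySem.Str.lower kw) = some b := by
    intro b
    simp [hfm, List.mem_filterMap]
  by_cases h0 : ∃ kw ∈ keywords, PySem.Str.lower kw ∈ pvW
  · have hc0 : (!(PySem.Set.inter (PySem.Set.ofList (keywords.map PySem.Str.lower)) pvWorkRelated).isEmpty) = true := by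
      rw [pv_setW]; exact (pv_condA keywords pvW).mpr h0
    have hmin : fm.min? = some 0 := by
      apply List.min?_eq_some_iff.mpr
      constructor
      · obtain ⟨kw, hkw, hm⟩ := h0
        exact (hmem 0).mpr ⟨kw, hkw, by rw [pv_get?_pvPriority]; simp [hm]⟩
      · intro b hb
        obtain ⟨kw, hkw, heq⟩ := (hmem b).mp hb
        rw [pv_get?_pvPriority] at heq
        split_ifs at heq with g0 g1 g2 g3 g4
        · injection heq with h'; omega
        · injection heq with h'; omega
        · injection heq with h'; omega
        · injection heq with h'; omega
        · injection heq with h'; omega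
    simp only [categorize_activity, hc0, hB, hmin]
    rfl

  · have hc0 : (!(PySem.Set.inter (PySem.Set.ofList (keywords.map PySem.Str.lower)) pvWorkRelated).isEmpty) = false := by
      rw [pv_setW]
      exact Bool.eq_false_iff.mpr (fun h => h0 ((pv_condA keywords pvW).mp h))
    by_cases h1 : ∃ kw ∈ keywords, PySem.Str.lower kw ∈ pvE
    · have hc1 : (!(PySem.Set.inter (PySem.Set.ofList (keywords.map PySem.Str.lower)) pvEntertainment).isEmpty) = true := by
        rw [pv_setE]; exact (pv_condA keywords pvE).mpr h1
      have hmin : fm.min? = some 1 := by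
        apply List.min?_eq_some_iff.mpr
        constructor
        · obtain ⟨kw, hkw, hm⟩ := h1
          have hnw : PySem.Str.lower kw ∉ pvW := fun m => h0 ⟨kw, hkw, m⟩
          exact (hmem 1).mpr ⟨kw, hkw, by rw [pv_get?_pvPriority]; simp [hm, hnw]⟩
        · intro b hb
          obtain ⟨kw, hkw, heq⟩ := (hmem b).mp hb
          rw [pv_get?_pvPriority] at heq
          split_ifs at heq with g0 g1 g2 g3 g4
          · exact absurd ⟨kw, hkw, g0⟩ h0
          · injection heq with h'; omega
          · injection heq with h'; omega
          · injection heq with h'; omega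
          · injection heq with h'; omega
      simp only [categorize_activity, hc0, hc1, hB, hmin]
      rfl

    · have hc1 : (!(PySem.Set.inter (PySem.Set.ofList (keywords.map PySem.Str.lower)) pvEntertainment).isEmpty) = false := by
        rw [pv_setE]
        exact Bool.eq_false_iff.mpr (fun h => h1 ((pv_condA keywords pvE).mp h))
      by_cases h2 : ∃ kw ∈ keywords, PySem.Str.lower kw ∈ pvL
      · have hc2 : (!(PySem.Set.inter (PySem.Set.ofList (keywords.map PySem.Str.lower)) pvLearning).isEmpty) = true := by
          rw [pv_setL]; exact (pv_condA keywords pvL).mpr h2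
        have hmin : fm.min? = some 2 := by
          apply List.min?_eq_some_iff.mpr
          constructor
          · obtain ⟨kw, hkw, hm⟩ := h2
            have hnw : PySem.Str.lower kw ∉ pvW := fun m => h0 ⟨kw, hkw, m⟩
            have hne : PySem.Str.lower kw ∉ pvE := fun m => h1 ⟨kw, hkw, m⟩
            exact (hmem 2).mpr ⟨kw, hkw, by rw [pv_get?_pvPriority]; simp [hm, hnw, hne]⟩
          · intro b hb
            obtain ⟨kw, hkw, heq⟩ := (hmem b).mp hb
            rw [pv_get?_pvPriority] at heq
            split_ifs at heq with g0 g1 g2 g3 g4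
            · exact absurd ⟨kw, hkw, g0⟩ h0
            · exact absurd ⟨kw, hkw, g1⟩ h1
            · injection heq with h'; omega
            · injection heq with h'; omega
            · injection heq with h'; omega
        simp only [categorize_activity, hc0, hc1, hc2, hB, hmin]
        rfl

      · have hc2 : (!(PySem.Set.inter (PySem.Set.ofList (keywords.map PySem.Str.lower)) pvLearning).isEmpty) = false := by
          rw [pv_setL]
          exact Bool.eq_false_iff.mpr (fun h => h2 ((pv_condA keywords pvL).mp h))
        by_cases h3 : ∃ kw ∈ keywords, PySem.Str.lower kw ∈ pvH
        · have hc3 : (!(PySem.Set.inter (PySem.Set.ofList (keywords.map PySem.Str.lower)) pvHealth).isEmpty) = true := by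
            rw [pv_setH]; exact (pv_condA keywords pvH).mpr h3
          have hmin : fm.min? = some 3 := by
            apply List.min?_eq_some_iff.mpr
            constructor
            · obtain ⟨kw, hkw, hm⟩ := h3
              have hnw : PySem.Str.lower kw ∉ pvW := fun m => h0 ⟨kw, hkw, m⟩
              have hne : PySem.Str.lower kw ∉ pvE := fun m => h1 ⟨kw, hkw, m⟩
              have hnl : PySem.Str.lower kw ∉ pvL := fun m => h2 ⟨kw, hkw, m⟩
              exact (hmem 3).mpr ⟨kw, hkw, by rw [pv_get?_pvPriority]; simp [hm, hnw, hne, hnl]⟩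
            · intro b hb
              obtain ⟨kw, hkw, heq⟩ := (hmem b).mp hb
              rw [pv_get?_pvPriority] at heq
              split_ifs at heq with g0 g1 g2 g3 g4
              · exact absurd ⟨kw, hkw, g0⟩ h0
              · exact absurd ⟨kw, hkw, g1⟩ h1
              · exact absurd ⟨kw, hkw, g2⟩ h2
              · injection heq with h'; omega
              · injection heq with h'; omega
          simp only [categorize_activity, hc0, hc1, hc2, hc3, hB, hmin]
          rfl

        · have hc3 : (!(PySem.Set.inter (PySem.Set.ofList (keywords.map PySem.Str.lower)) pvHealth).isEmpty) = false := by
            rw [pv_setH]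
            exact Bool.eq_false_iff.mpr (fun h => h3 ((pv_condA keywords pvH).mp h))
          by_cases h4 : ∃ kw ∈ keywords, PySem.Str.lower kw ∈ pvT
          · have hc4 : (!(PySem.Set.inter (PySem.Set.ofList (keywords.map PySem.Str.lower)) pvTech).isEmpty) = true := by
              rw [pv_setT]; exact (pv_condA keywords pvT).mpr h4
            have hmin : fm.min? = some 4 := by
              apply List.min?_eq_some_iff.mpr
              constructor
              · obtain ⟨kw, hkw, hm⟩ := h4
                have hnw : PySem.Str.lower kw ∉ pvW := fun m => h0 ⟨kw, hkw, m⟩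
                have hne : PySem.Str.lower kw ∉ pvE := fun m => h1 ⟨kw, hkw, m⟩
                have hnl : PySem.Str.lower kw ∉ pvL := fun m => h2 ⟨kw, hkw, m⟩
                have hnh : PySem.Str.lower kw ∉ pvH := fun m => h3 ⟨kw, hkw, m⟩
                exact (hmem 4).mpr ⟨kw, hkw, by rw [pv_get?_pvPriority]; simp [hm, hnw, hne, hnl, hnh]⟩
              · intro b hb
                obtain ⟨kw, hkw, heq⟩ := (hmem b).mp hb
                rw [pv_get?_pvPriority] at heq
                split_ifs at heq with g0 g1 g2 g3 g4
                · exact absurd ⟨kw, hkw, g0⟩ h0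
                · exact absurd ⟨kw, hkw, g1⟩ h1
                · exact absurd ⟨kw, hkw, g2⟩ h2
                · exact absurd ⟨kw, hkw, g3⟩ h3
                · injection heq with h'; omega
            simp only [categorize_activity, hc0, hc1, hc2, hc3, hc4, hB, hmin]
            rfl

          · have hc4 : (!(PySem.Set.inter (PySem.Set.ofList (keywords.map PySem.Str.lower)) pvTech).isEmpty) = false := by
              rw [pv_setT]
              exact Bool.eq_false_iff.mpr (fun h => h4 ((pv_condA keywords pvT).mp h))
            have hmin : fm.min? = none := by
              apply List.min?_eq_none_iff.mpr
              by_contra hne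
              obtain ⟨b, hb⟩ := List.exists_mem_of_ne_nil _ hne
              obtain ⟨kw, hkw, heq⟩ := (hmem b).mp hb
              rw [pv_get?_pvPriority] at heq
              split_ifs at heq with g0 g1 g2 g3 g4
              · exact absurd ⟨kw, hkw, g0⟩ h0
              · exact absurd ⟨kw, hkw, g1⟩ h1
              · exact absurd ⟨kw, hkw, g2⟩ h2
              · exact absurd ⟨kw, hkw, g3⟩ h3
              · exact absurd ⟨kw, hkw, g4⟩ h4
            simp only [categorize_activity, hc0, hc1, hc2, hc3, hc4, hB, hmin]
            rfl


-- ===== VERDICT (by name: the statement is the Claim_ definition above) =====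
theorem categorize_activity_spec : Claim_equal_categorize_activity := by
  intro keywords _
  unfold Spec_categorize_activity
  exact pv_spec keywords
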